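-- pv_equiv track=rewrite | github.com/jeffwang4321/Leetcode | companies/InstaCart/simulate_fall.py | simulate_fall2
-- ===== SOURCE A (Python) =====
-- def simulate_fall2(matrix):
--     ROWS = len(matrix)
--     COLS = len(matrix[0])
--     while True:
--         shape = [(row, col) for row in range(ROWS) for col in range(COLS) if matrix[row][col] == "F"]
--         if not shape:  # If shape is empty,
--             break
--
--         can_fall = True
--         for row, col in shape:
--             if row + 1 >= ROWS or matrix[row + 1][col] == "#":
--                 can_fall = False
--
--         if can_fall:
--             for row, col in shape:
--                 matrix[row][col] = "-"
--             for row, col in shape: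
--                 matrix[row + 1][col] = "F"
--         else:
--             break
--
--     return matrix
-- ===== SOURCE B (Python) =====
-- def simulate_fall2(matrix):
--     # Alternative algorithm: one bottom-up sweep per column computes each F cell's
--     # distance to the first '#' below it (or to the floor); the shape then falls by
--     # the global minimum d, written in a single shot instead of step-by-step
--     # whole-grid resimulation. Mutates matrix in place like A does.
--     ROWS = len(matrix)
--     COLS = len(matrix[0])
--     d = ROWS
--     shape = []
--     for c in range(COLS):
--         gap = 0
--         for r in range(ROWS - 1, -1, -1):
--             cell = matrix[r][c]
--             if cell == "F":
--                 shape.append((r, c))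
--                 if gap < d:
--                     d = gap
--             gap = 0 if cell == "#" else gap + 1
--     if shape and d > 0:
--         for r, c in shape:
--             for k in range(d):
--                 matrix[r + k][c] = "-"
--         for r, c in shape:
--             matrix[r + d][c] = "F"
--     return matrix
-- ===== Notes on version B (the rewrite author's own statement) =====
-- stated objective: alternative
-- what changed: Instead of repeatedly rescanning the whole grid and moving the shape one row per iteration until blocked, B computes each column's distance to the first '#' below in one bottom-up sweep, takes the global minimum d, and writes the shape shifted down by d in a single pass.
import Mathlib
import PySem

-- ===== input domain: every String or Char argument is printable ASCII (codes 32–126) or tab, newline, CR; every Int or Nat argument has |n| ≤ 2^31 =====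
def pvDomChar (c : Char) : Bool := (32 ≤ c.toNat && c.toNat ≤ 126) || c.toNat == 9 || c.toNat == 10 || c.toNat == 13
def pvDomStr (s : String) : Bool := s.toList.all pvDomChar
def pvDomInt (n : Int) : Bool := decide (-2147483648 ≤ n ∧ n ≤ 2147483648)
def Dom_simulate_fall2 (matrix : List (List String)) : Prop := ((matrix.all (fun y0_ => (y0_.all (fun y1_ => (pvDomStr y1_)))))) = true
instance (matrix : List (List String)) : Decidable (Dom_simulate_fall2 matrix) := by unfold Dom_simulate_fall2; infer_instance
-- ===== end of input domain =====

-- B replaces A's step-by-step whole-grid resimulation by one bottom-up sweep per column computing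
-- the fall distance, then a single shifted write (objective: alternative algorithm). Both A and B
-- mutate the Python list in place identically; the theorems are about the returned value.

-- ===== PORT A =====
-- matrix[r][c] (all accesses are in range on Pre_; "" default keeps the port total)
def pvGet2 (g : List (List String)) (r c : Nat) : String := (g.getD r []).getD c ""

-- matrix[r][c] = v
def pvSet2 (g : List (List String)) (r c : Nat) (v : String) : List (List String) :=
  g.modify r (fun row => row.set c v)

-- the shape comprehension
def pvShape (ROWS COLS : Nat) (g : List (List String)) : List (Nat × Nat) :=
  (List.range ROWS).flatMap (fun r =>
    (List.range COLS).filterMap (fun c => if pvGet2 g r c = "F" then some (r, c) else none))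

-- the can_fall accumulator loop
def pvCanFall (ROWS : Nat) (g : List (List String)) (shape : List (Nat × Nat)) : Bool :=
  shape.foldl (fun acc rc =>
    if ROWS ≤ rc.1 + 1 ∨ pvGet2 g (rc.1 + 1) rc.2 = "#" then false else acc) true

-- the 'while True' loop; it runs at most ROWS times, fuel ROWS+1 is never exhausted
def pvLoopA (ROWS COLS : Nat) : Nat → List (List String) → List (List String)
  | 0, g => g
  | fuel + 1, g =>
    let shape := pvShape ROWS COLS g
    if shape.isEmpty then g
    else if pvCanFall ROWS g shape then
      let g1 := shape.foldl (fun h rc => pvSet2 h rc.1 rc.2 "-") g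
      let g2 := shape.foldl (fun h rc => pvSet2 h (rc.1 + 1) rc.2 "F") g1
      pvLoopA ROWS COLS fuel g2
    else g

def simulate_fall2 (matrix : List (List String)) : List (List String) :=
  let ROWS := matrix.length
  let COLS := (matrix.headD []).length
  pvLoopA ROWS COLS (ROWS + 1) matrix

-- ===== PORT B =====
-- pass 1 of Source B: per column, bottom-up, collect the F cells and the global minimum fall distance
def pvPass1 (ROWS COLS : Nat) (g : List (List String)) : List (Nat × Nat) × Nat :=
  (List.range COLS).foldl
    (fun (sd : List (Nat × Nat) × Nat) c =>
      let st := (List.range ROWS).foldl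
        (fun (st : List (Nat × Nat) × Nat × Nat) i =>
          let r := ROWS - 1 - i
          let cell := pvGet2 g r c
          let sh := if cell = "F" then st.1 ++ [(r, c)] else st.1
          let d := if cell = "F" then min st.2.1 st.2.2 else st.2.1
          let gap := if cell = "#" then 0 else st.2.2 + 1
          (sh, d, gap))
        (sd.1, sd.2, 0)
      (st.1, st.2.1))
    ([], ROWS)

def simulate_fall2_alt (matrix : List (List String)) : List (List String) :=
  let ROWS := matrix.length
  let COLS := (matrix.headD []).length
  let p := pvPass1 ROWS COLS matrix
  if p.1 ≠ [] ∧ 0 < p.2 then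
    let g1 := p.1.foldl (fun h rc =>
      (List.range p.2).foldl (fun h2 k => pvSet2 h2 (rc.1 + k) rc.2 "-") h) matrix
    p.1.foldl (fun h rc => pvSet2 h (rc.1 + p.2) rc.2 "F") g1
  else matrix

-- ===== PRECONDITION & SPEC =====
-- Pre_ excludes exactly the inputs on which A raises IndexError: the empty matrix
-- (matrix[0]) and matrices with a row shorter than row 0 (the shape comprehension).
def Pre_simulate_fall2 (matrix : List (List String)) : Prop :=
  matrix ≠ [] ∧ ∀ row ∈ matrix, (matrix.headD []).length ≤ row.length
instance (matrix : List (List String)) : Decidable (Pre_simulate_fall2 matrix) := by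
  unfold Pre_simulate_fall2; infer_instance

def pvWitness_simulate_fall2 : List (List String) := [["F", "-"], ["-", "#"], ["-", "-"]]

def Spec_simulate_fall2 (matrix : List (List String)) (out : List (List String)) : Prop := out = simulate_fall2_alt matrix
instance (matrix : List (List String)) (out : List (List String)) : Decidable (Spec_simulate_fall2 matrix out) := by unfold Spec_simulate_fall2; infer_instance

-- ===== CLAIM (what is proved, stated in full; the proofs are below) =====
def Claim_equal_simulate_fall2 : Prop := ∀ (matrix : List (List String)), Dom_simulate_fall2 matrix → Pre_simulate_fall2 matrix → Spec_simulate_fall2 matrix (simulate_fall2 matrix)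

-- ===== LEMMAS AND PROOFS =====

-- row r's length
def pvRlen (g : List (List String)) (r : Nat) : Nat := (g.getD r []).length

-- "F at (f,c), inside the scanned COLS window" (Bool so every use is decidable)
def pvFB (g : List (List String)) (f c : Nat) : Bool :=
  decide (f < g.length) && decide (c < (g.headD []).length) && (pvGet2 g f c == "F")

-- how far the cell at (r,c) can fall: distance to the first '#' strictly below, else to the floor
def pvGap (g : List (List String)) (c r : Nat) : Nat :=
  if g.length ≤ r + 1 ∨ pvGet2 g (r + 1) c = "#" then 0 else pvGap g c (r + 1) + 1
termination_by g.length - r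
decreasing_by omega

-- the common pointwise description of the result: every F cell shifted down by D, '-' trail behind
def pvRes (g : List (List String)) (D r c : Nat) : String :=
  if ∃ f ∈ Finset.range g.length, pvFB g f c ∧ f + D = r then "F"
  else if ∃ f ∈ Finset.range g.length, pvFB g f c ∧ f ≤ r ∧ r < f + D then "-"
  else pvGet2 g r c

-- dimensions of a grid, and the dimension part of Pre_
def pvDims (g : List (List String)) : Prop :=
  g ≠ [] ∧ ∀ r < g.length, (g.headD []).length ≤ pvRlen g r


theorem pvC_eq (g : List (List String)) : (g.headD []).length = pvRlen g 0 := by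
  cases g <;> simp [pvRlen]

theorem length_pvSet2 (g : List (List String)) (r c : Nat) (v : String) :
    (pvSet2 g r c v).length = g.length := by simp [pvSet2]

theorem rlen_pvSet2 (g : List (List String)) (r c : Nat) (v : String) (i : Nat) :
    pvRlen (pvSet2 g r c v) i = pvRlen g i := by
  simp only [pvSet2, pvRlen, List.getD_eq_getElem?_getD, List.getElem?_modify]
  rcases hg : g[i]? with _ | row <;> simp
  split <;> simp

theorem get2_pvSet2 (g : List (List String)) (r c : Nat) (v : String) (r' c' : Nat) :
    pvGet2 (pvSet2 g r c v) r' c' =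
      if r = r' ∧ c = c' ∧ r < g.length ∧ c < pvRlen g r then v else pvGet2 g r' c' := by
  simp only [pvSet2, pvGet2, pvRlen, List.getD_eq_getElem?_getD, List.getElem?_modify]
  by_cases h : r = r'
  · subst h
    rcases hg : g[r]? with _ | row
    · have : ¬ r < g.length := by
        intro hl; exact absurd (List.getElem?_eq_getElem hl) (by simp [hg])
      simp [this]
    · have hl : r < g.length := by
        by_contra hl
        rw [List.getElem?_eq_none (by omega)] at hg; cases hg
      simp only [Option.getD]
      by_cases hc : c = c'
      · subst hc
        by_cases hcl : c < row.length <;> simp [hcl, hl]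
      · simp [hc, hl]
  · rcases hg : g[r']? with _ | row <;> simp [h]

theorem length_foldl_pvSet2 {α : Type} (ps : List α) (f : α → Nat × Nat) (v : String)
    (g : List (List String)) :
    (ps.foldl (fun h a => pvSet2 h (f a).1 (f a).2 v) g).length = g.length := by
  induction ps generalizing g with
  | nil => rfl
  | cons a ps ih => simp [List.foldl_cons, ih, length_pvSet2]

theorem rlen_foldl_pvSet2 {α : Type} (ps : List α) (f : α → Nat × Nat) (v : String)
    (g : List (List String)) (i : Nat) :
    pvRlen (ps.foldl (fun h a => pvSet2 h (f a).1 (f a).2 v) g) i = pvRlen g i := by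
  induction ps generalizing g with
  | nil => rfl
  | cons a ps ih => simp [List.foldl_cons, ih, rlen_pvSet2]

theorem get2_foldl_pvSet2 {α : Type} (ps : List α) (f : α → Nat × Nat) (v : String)
    (g : List (List String)) (r c : Nat) :
    pvGet2 (ps.foldl (fun h a => pvSet2 h (f a).1 (f a).2 v) g) r c =
      if ∃ a ∈ ps, (f a).1 = r ∧ (f a).2 = c ∧ r < g.length ∧ c < pvRlen g r then v
      else pvGet2 g r c := by
  induction ps generalizing g with
  | nil => simp
  | cons a ps ih =>
    rw [List.foldl_cons, ih]
    rw [length_pvSet2, rlen_pvSet2, get2_pvSet2]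
    by_cases h1 : ∃ a' ∈ ps, (f a').1 = r ∧ (f a').2 = c ∧ r < g.length ∧ c < pvRlen g r
    · rw [if_pos h1, if_pos]
      obtain ⟨a', ha', hrest⟩ := h1
      exact ⟨a', List.mem_cons_of_mem _ ha', hrest⟩
    · rw [if_neg h1]
      by_cases h2 : (f a).1 = r ∧ (f a).2 = c ∧ (f a).1 < g.length ∧ (f a).2 < pvRlen g (f a).1
      · rw [if_pos h2, if_pos]
        exact ⟨a, List.mem_cons_self, h2.1, h2.2.1, h2.1 ▸ h2.2.2.1, by
          rw [h2.1] at h2; rw [h2.2.1] at h2; exact h2.2.2.2⟩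
      · rw [if_neg h2, if_neg]
        rintro ⟨a', ha', hf1, hf2, hlt, hlt2⟩
        rcases List.mem_cons.1 ha' with rfl | hmem
        · exact h2 ⟨hf1, hf2, hf1 ▸ hlt, by rw [hf1, hf2]; exact hlt2⟩
        · exact h1 ⟨a', hmem, hf1, hf2, hlt, hlt2⟩

theorem pvCanFall_aux (R : Nat) (g : List (List String)) (s : List (Nat × Nat)) (acc : Bool) :
    (s.foldl (fun acc rc =>
      if R ≤ rc.1 + 1 ∨ pvGet2 g (rc.1 + 1) rc.2 = "#" then false else acc) acc) = true ↔
      acc = true ∧ ∀ rc ∈ s, ¬(R ≤ rc.1 + 1 ∨ pvGet2 g (rc.1 + 1) rc.2 = "#") := by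
  induction s generalizing acc with
  | nil => simp
  | cons a s ih =>
    rw [List.foldl_cons]
    by_cases h : R ≤ a.1 + 1 ∨ pvGet2 g (a.1 + 1) a.2 = "#"
    · rw [if_pos h, ih]
      constructor
      · rintro ⟨h0, -⟩; cases h0
      · rintro ⟨-, hall⟩; exact absurd h (hall a List.mem_cons_self)
    · rw [if_neg h, ih]
      constructor
      · rintro ⟨ha, hs⟩
        exact ⟨ha, fun rc hrc => (List.mem_cons.1 hrc).elim (fun e => e ▸ h) (hs rc)⟩
      · rintro ⟨ha, hs⟩
        exact ⟨ha, fun rc hrc => hs rc (List.mem_cons_of_mem _ hrc)⟩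

theorem pvCanFall_iff (R : Nat) (g : List (List String)) (s : List (Nat × Nat)) :
    pvCanFall R g s = true ↔
      ∀ rc ∈ s, rc.1 + 1 < R ∧ pvGet2 g (rc.1 + 1) rc.2 ≠ "#" := by
  rw [pvCanFall, pvCanFall_aux]
  constructor
  · rintro ⟨-, h⟩ rc hrc
    have := h rc hrc; push Not at this; exact ⟨by omega, this.2⟩
  · intro h
    refine ⟨rfl, fun rc hrc => ?_⟩
    have := h rc hrc; push Not; exact ⟨by omega, this.2⟩

theorem mem_pvShape (R C : Nat) (g : List (List String)) (rc : Nat × Nat) :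
    rc ∈ pvShape R C g ↔ rc.1 < R ∧ rc.2 < C ∧ pvGet2 g rc.1 rc.2 = "F" := by
  obtain ⟨r, c⟩ := rc
  simp only [pvShape, List.mem_flatMap, List.mem_filterMap, List.mem_range]
  constructor
  · rintro ⟨r', hr', c', hc', h⟩
    split at h
    · rename_i hF; cases h; exact ⟨hr', hc', hF⟩
    · cases h
  · rintro ⟨hr, hc, hF⟩
    exact ⟨r, hr, c, hc, by simp [hF]⟩


theorem pvGap_zero (g : List (List String)) (c r : Nat)
    (h : g.length ≤ r + 1 ∨ pvGet2 g (r + 1) c = "#") : pvGap g c r = 0 := by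
  rw [pvGap, if_pos h]

theorem pvGap_bottom (g : List (List String)) (c r : Nat) (h : g.length ≤ r + 1) :
    pvGap g c r = 0 := pvGap_zero g c r (Or.inl h)

theorem pvGap_pos_iff (g : List (List String)) (c r : Nat) :
    0 < pvGap g c r ↔ r + 1 < g.length ∧ pvGet2 g (r + 1) c ≠ "#" := by
  rw [pvGap]
  split
  · rename_i h
    constructor
    · intro h0; exact absurd h0 (Nat.lt_irrefl 0)
    · rintro ⟨h1, h2⟩
      rcases h with h | h
      · omega
      · exact (h2 h).elim
  · rename_i h
    push Not at h
    exact iff_of_true (Nat.succ_pos _) ⟨by omega, h.2⟩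

theorem pvGap_succ (g : List (List String)) (c r : Nat) (h : 0 < pvGap g c r) :
    pvGap g c r = pvGap g c (r + 1) + 1 := by
  have h2 := (pvGap_pos_iff g c r).1 h
  conv_lhs => rw [pvGap]
  rw [if_neg]
  push Not
  exact ⟨by omega, h2.2⟩

theorem pvGap_le_aux (g : List (List String)) (c : Nat) :
    ∀ n r, r < g.length → g.length - r ≤ n → pvGap g c r + r + 1 ≤ g.length := by
  intro n
  induction n with
  | zero => intro r hr hn; omega
  | succ n ih =>
    intro r hr hn
    by_cases h : g.length ≤ r + 1 ∨ pvGet2 g (r + 1) c = "#"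
    · rw [pvGap, if_pos h]; omega
    · rw [pvGap, if_neg h]
      push Not at h
      have := ih (r + 1) (by omega) (by omega)
      omega

theorem pvGap_le (g : List (List String)) (c r : Nat) (hr : r < g.length) :
    pvGap g c r + r + 1 ≤ g.length :=
  pvGap_le_aux g c (g.length - r) r hr le_rfl

theorem pvGap_congr_aux (g h : List (List String)) (hl : g.length = h.length)
    (hH : ∀ r c, pvGet2 g r c = "#" ↔ pvGet2 h r c = "#") (c : Nat) :
    ∀ n r, g.length - r ≤ n → pvGap g c r = pvGap h c r := by
  intro n
  induction n with
  | zero =>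
    intro r hn
    rw [pvGap_bottom g c r (by omega), pvGap_bottom h c r (by omega)]
  | succ n ih =>
    intro r hn
    by_cases hg : g.length ≤ r + 1 ∨ pvGet2 g (r + 1) c = "#"
    · have hh : h.length ≤ r + 1 ∨ pvGet2 h (r + 1) c = "#" := by
        rcases hg with hg | hg
        · exact Or.inl (by omega)
        · exact Or.inr ((hH (r + 1) c).1 hg)
      rw [pvGap_zero g c r hg, pvGap_zero h c r hh]
    · have hh : ¬(h.length ≤ r + 1 ∨ pvGet2 h (r + 1) c = "#") := by
        push Not at hg ⊢
        exact ⟨by omega, fun e => hg.2 ((hH (r + 1) c).2 e)⟩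
      conv_lhs => rw [pvGap]
      conv_rhs => rw [pvGap]
      rw [if_neg hg, if_neg hh, ih (r + 1) (by omega)]

theorem pvGap_congr (g h : List (List String)) (hl : g.length = h.length)
    (hH : ∀ r c, pvGet2 g r c = "#" ↔ pvGet2 h r c = "#") (c r : Nat) :
    pvGap g c r = pvGap h c r :=
  pvGap_congr_aux g h hl hH c (g.length - r) r le_rfl


theorem pvPass1_inner (g : List (List String)) (c : Nat) :
    ∀ n, n ≤ g.length → ∀ (sh0 : List (Nat × Nat)) (d0 : Nat),
    (∀ rc, rc ∈ ((List.range n).foldl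
        (fun (st : List (Nat × Nat) × Nat × Nat) i =>
          let r := g.length - 1 - i
          let cell := pvGet2 g r c
          let sh := if cell = "F" then st.1 ++ [(r, c)] else st.1
          let d := if cell = "F" then min st.2.1 st.2.2 else st.2.1
          let gap := if cell = "#" then 0 else st.2.2 + 1
          (sh, d, gap)) (sh0, d0, 0)).1 ↔
        (rc ∈ sh0 ∨ (g.length - n ≤ rc.1 ∧ rc.1 < g.length ∧ rc.2 = c ∧
          pvGet2 g rc.1 c = "F"))) ∧
    ((List.range n).foldl
        (fun (st : List (Nat × Nat) × Nat × Nat) i =>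
          let r := g.length - 1 - i
          let cell := pvGet2 g r c
          let sh := if cell = "F" then st.1 ++ [(r, c)] else st.1
          let d := if cell = "F" then min st.2.1 st.2.2 else st.2.1
          let gap := if cell = "#" then 0 else st.2.2 + 1
          (sh, d, gap)) (sh0, d0, 0)).2.1 ≤ d0 ∧
    (∀ r', g.length - n ≤ r' → r' < g.length → pvGet2 g r' c = "F" →
        ((List.range n).foldl
        (fun (st : List (Nat × Nat) × Nat × Nat) i =>
          let r := g.length - 1 - i
          let cell := pvGet2 g r c
          let sh := if cell = "F" then st.1 ++ [(r, c)] else st.1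
          let d := if cell = "F" then min st.2.1 st.2.2 else st.2.1
          let gap := if cell = "#" then 0 else st.2.2 + 1
          (sh, d, gap)) (sh0, d0, 0)).2.1 ≤ pvGap g c r') ∧
    (((List.range n).foldl
        (fun (st : List (Nat × Nat) × Nat × Nat) i =>
          let r := g.length - 1 - i
          let cell := pvGet2 g r c
          let sh := if cell = "F" then st.1 ++ [(r, c)] else st.1
          let d := if cell = "F" then min st.2.1 st.2.2 else st.2.1
          let gap := if cell = "#" then 0 else st.2.2 + 1
          (sh, d, gap)) (sh0, d0, 0)).2.1 = d0 ∨
      ∃ r', g.length - n ≤ r' ∧ r' < g.length ∧ pvGet2 g r' c = "F" ∧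
        pvGap g c r' = ((List.range n).foldl
        (fun (st : List (Nat × Nat) × Nat × Nat) i =>
          let r := g.length - 1 - i
          let cell := pvGet2 g r c
          let sh := if cell = "F" then st.1 ++ [(r, c)] else st.1
          let d := if cell = "F" then min st.2.1 st.2.2 else st.2.1
          let gap := if cell = "#" then 0 else st.2.2 + 1
          (sh, d, gap)) (sh0, d0, 0)).2.1) ∧
    (n < g.length → ((List.range n).foldl
        (fun (st : List (Nat × Nat) × Nat × Nat) i =>
          let r := g.length - 1 - i
          let cell := pvGet2 g r c
          let sh := if cell = "F" then st.1 ++ [(r, c)] else st.1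
          let d := if cell = "F" then min st.2.1 st.2.2 else st.2.1
          let gap := if cell = "#" then 0 else st.2.2 + 1
          (sh, d, gap)) (sh0, d0, 0)).2.2 = pvGap g c (g.length - 1 - n)) := by
  intro n
  induction n with
  | zero =>
    intro hn sh0 d0
    refine ⟨?_, le_rfl, by intro r' h1 h2 h3; omega, Or.inl rfl, ?_⟩
    · intro rc
      simp only [List.range_zero, List.foldl_nil]
      constructor
      · exact Or.inl
      · rintro (h | ⟨h1, h2, -⟩)
        · exact h
        · omega
    intro hlen
    simp only [List.range_zero, List.foldl_nil]
    rw [pvGap_bottom g c (g.length - 1 - 0) (by omega)]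
  | succ n ih =>
    intro hn sh0 d0
    obtain ⟨P1, P2, P3, P4, P5⟩ := ih (by omega) sh0 d0
    rw [List.range_succ, List.foldl_append, List.foldl_cons, List.foldl_nil]
    set st := (List.range n).foldl
        (fun (st : List (Nat × Nat) × Nat × Nat) i =>
          let r := g.length - 1 - i
          let cell := pvGet2 g r c
          let sh := if cell = "F" then st.1 ++ [(r, c)] else st.1
          let d := if cell = "F" then min st.2.1 st.2.2 else st.2.1
          let gap := if cell = "#" then 0 else st.2.2 + 1
          (sh, d, gap)) (sh0, d0, 0) with hst
    have hgap : st.2.2 = pvGap g c (g.length - 1 - n) := P5 (by omega)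
    simp only []
    constructor
    · -- membership
      intro rc
      by_cases hF : pvGet2 g (g.length - 1 - n) c = "F"
      · simp only [if_pos hF, List.mem_append, List.mem_singleton, P1]
        constructor
        · rintro ((h | h) | h)
          · exact Or.inl h
          · exact Or.inr ⟨by omega, h.2.1, h.2.2⟩
          · subst h; exact Or.inr ⟨by omega, by omega, rfl, hF⟩
        · rintro (h | ⟨hle, hlt, hc2, hFr⟩)
          · exact Or.inl (Or.inl h)
          · by_cases he : rc.1 = g.length - 1 - n
            · right
              have : rc = (g.length - 1 - n, c) := by
                obtain ⟨a, b⟩ := rc; simp_all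
              exact this
            · exact Or.inl (Or.inr ⟨by omega, hlt, hc2, hFr⟩)
      · simp only [if_neg hF, P1]
        constructor
        · rintro (h | h)
          · exact Or.inl h
          · exact Or.inr ⟨by omega, h.2.1, h.2.2⟩
        · rintro (h | ⟨hle, hlt, hc2, hFr⟩)
          · exact Or.inl h
          · by_cases he : rc.1 = g.length - 1 - n
            · exact absurd hFr (by rw [he, hc2] at *; exact hF)
            · exact Or.inr ⟨by omega, hlt, hc2, hFr⟩
    constructor
    · -- d ≤ d0
      split <;> [exact le_trans (min_le_left _ _) P2; exact P2]
    constructor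
    · -- d ≤ all gaps in range
      intro r' h1 h2 h3
      by_cases he : r' = g.length - 1 - n
      · subst he
        rw [if_pos h3, ← hgap]
        exact min_le_right _ _
      · have hd : (if pvGet2 g (g.length - 1 - n) c = "F" then min st.2.1 st.2.2 else st.2.1) ≤ st.2.1 := by
          split <;> [exact min_le_left _ _; exact le_rfl]
        exact le_trans hd (P3 r' (by omega) h2 h3)
    constructor
    · -- attained or untouched
      by_cases hF : pvGet2 g (g.length - 1 - n) c = "F"
      · rw [if_pos hF]
        rcases le_total st.2.1 st.2.2 with hmin | hmin
        · rw [min_eq_left hmin]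
          rcases P4 with h | ⟨r', h1, h2, h3, h4⟩
          · exact Or.inl h
          · exact Or.inr ⟨r', by omega, h2, h3, h4⟩
        · rw [min_eq_right hmin]
          exact Or.inr ⟨g.length - 1 - n, by omega, by omega, hF, by rw [← hgap]⟩
      · rw [if_neg hF]
        rcases P4 with h | ⟨r', h1, h2, h3, h4⟩
        · exact Or.inl h
        · exact Or.inr ⟨r', by omega, h2, h3, h4⟩
    · -- gap invariant
      intro hlen
      by_cases hH : pvGet2 g (g.length - 1 - n) c = "#"
      · rw [if_pos hH]
        rw [pvGap_zero g c (g.length - 1 - (n + 1))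
          (Or.inr (by rw [show g.length - 1 - (n + 1) + 1 = g.length - 1 - n by omega]; exact hH))]
      · rw [if_neg hH, hgap]
        conv_rhs => rw [pvGap]
        rw [if_neg, show g.length - 1 - (n + 1) + 1 = g.length - 1 - n by omega]
        push Not
        rw [show g.length - 1 - (n + 1) + 1 = g.length - 1 - n by omega]
        exact ⟨by omega, hH⟩


theorem pvPass1_char (g : List (List String)) :
    ∀ C : Nat,
    (∀ rc : Nat × Nat, rc ∈ (pvPass1 g.length C g).1 ↔
        rc.1 < g.length ∧ rc.2 < C ∧ pvGet2 g rc.1 rc.2 = "F") ∧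
    (pvPass1 g.length C g).2 ≤ g.length ∧
    (∀ r c, r < g.length → c < C → pvGet2 g r c = "F" →
        (pvPass1 g.length C g).2 ≤ pvGap g c r) ∧
    ((pvPass1 g.length C g).2 = g.length ∨
      ∃ r c, r < g.length ∧ c < C ∧ pvGet2 g r c = "F" ∧
        pvGap g c r = (pvPass1 g.length C g).2) := by
  intro C
  induction C with
  | zero =>
    refine ⟨?_, le_rfl, by intro r c h1 h2; omega, Or.inl rfl⟩
    intro rc
    simp [pvPass1]
  | succ C ih =>
    obtain ⟨Q1, Q2, Q3, Q4⟩ := ih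
    have hunf : pvPass1 g.length (C + 1) g =
        (fun (sd : List (Nat × Nat) × Nat) c =>
          let st := (List.range g.length).foldl
            (fun (st : List (Nat × Nat) × Nat × Nat) i =>
              let r := g.length - 1 - i
              let cell := pvGet2 g r c
              let sh := if cell = "F" then st.1 ++ [(r, c)] else st.1
              let d := if cell = "F" then min st.2.1 st.2.2 else st.2.1
              let gap := if cell = "#" then 0 else st.2.2 + 1
              (sh, d, gap))
            (sd.1, sd.2, 0)
          (st.1, st.2.1)) (pvPass1 g.length C g) C := by
      conv_lhs => rw [pvPass1, List.range_succ, List.foldl_append]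
      rw [List.foldl_cons, List.foldl_nil, ← pvPass1]
    obtain ⟨P1, P2, P3, P4, -⟩ :=
      pvPass1_inner g C g.length le_rfl (pvPass1 g.length C g).1 (pvPass1 g.length C g).2
    rw [hunf]
    refine ⟨?_, ?_, ?_, ?_⟩
    · intro rc
      rw [show ((fun (sd : List (Nat × Nat) × Nat) c =>
          let st := (List.range g.length).foldl
            (fun (st : List (Nat × Nat) × Nat × Nat) i =>
              let r := g.length - 1 - i
              let cell := pvGet2 g r c
              let sh := if cell = "F" then st.1 ++ [(r, c)] else st.1
              let d := if cell = "F" then min st.2.1 st.2.2 else st.2.1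
              let gap := if cell = "#" then 0 else st.2.2 + 1
              (sh, d, gap))
            (sd.1, sd.2, 0)
          (st.1, st.2.1)) (pvPass1 g.length C g) C).1 = ((List.range g.length).foldl
            (fun (st : List (Nat × Nat) × Nat × Nat) i =>
              let r := g.length - 1 - i
              let cell := pvGet2 g r C
              let sh := if cell = "F" then st.1 ++ [(r, C)] else st.1
              let d := if cell = "F" then min st.2.1 st.2.2 else st.2.1
              let gap := if cell = "#" then 0 else st.2.2 + 1
              (sh, d, gap))
            ((pvPass1 g.length C g).1, (pvPass1 g.length C g).2, 0)).1 from rfl]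
      rw [P1 rc, Q1 rc]
      constructor
      · rintro (⟨h1, h2, h3⟩ | ⟨-, h2, h3, h4⟩)
        · exact ⟨h1, by omega, h3⟩
        · exact ⟨h2, by omega, h3 ▸ h4⟩
      · rintro ⟨h1, h2, h3⟩
        by_cases hc : rc.2 = C
        · exact Or.inr ⟨by omega, h1, hc, hc ▸ h3⟩
        · exact Or.inl ⟨h1, by omega, h3⟩
    · exact le_trans P2 Q2
    · intro r c h1 h2 h3
      by_cases hc : c = C
      · subst hc; exact P3 r (by omega) h1 h3
      · exact le_trans P2 (Q3 r c h1 (by omega) h3)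
    · rcases P4 with h | ⟨r', h1, h2, h3, h4⟩
      · rcases Q4 with h' | ⟨r, c2, hq1, hq2, hq3, hq4⟩
        · exact Or.inl (h.trans h')
        · exact Or.inr ⟨r, c2, hq1, by omega, hq3, hq4.trans h.symm⟩
      · exact Or.inr ⟨r', C, h2, by omega, h3, h4⟩


-- the fall distance B computes
def pvD (g : List (List String)) : Nat := (pvPass1 g.length (g.headD []).length g).2

theorem pvFB_iff (g : List (List String)) (f c : Nat) :
    pvFB g f c = true ↔ f < g.length ∧ c < (g.headD []).length ∧ pvGet2 g f c = "F" := by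
  simp [pvFB, and_assoc]

theorem pvRes_F (g : List (List String)) (D r c : Nat)
    (h : ∃ f, pvFB g f c = true ∧ f + D = r) : pvRes g D r c = "F" := by
  unfold pvRes
  rw [if_pos]
  obtain ⟨f, hf, he⟩ := h
  exact ⟨f, Finset.mem_range.2 ((pvFB_iff g f c).1 hf).1, hf, he⟩

theorem pvRes_dash (g : List (List String)) (D r c : Nat)
    (h1 : ¬ ∃ f, pvFB g f c = true ∧ f + D = r)
    (h2 : ∃ f, pvFB g f c = true ∧ f ≤ r ∧ r < f + D) : pvRes g D r c = "-" := by
  unfold pvRes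
  rw [if_neg, if_pos]
  · obtain ⟨f, hf, he⟩ := h2
    exact ⟨f, Finset.mem_range.2 ((pvFB_iff g f c).1 hf).1, hf, he⟩
  · rintro ⟨f, -, hf, he⟩
    exact h1 ⟨f, hf, he⟩

theorem pvRes_keep (g : List (List String)) (D r c : Nat)
    (h1 : ¬ ∃ f, pvFB g f c = true ∧ f + D = r)
    (h2 : ¬ ∃ f, pvFB g f c = true ∧ f ≤ r ∧ r < f + D) : pvRes g D r c = pvGet2 g r c := by
  unfold pvRes
  rw [if_neg, if_neg]
  · rintro ⟨f, -, hf, he⟩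
    exact h2 ⟨f, hf, he⟩
  · rintro ⟨f, -, hf, he⟩
    exact h1 ⟨f, hf, he⟩

theorem pvRes_zero (g : List (List String)) (r c : Nat) :
    pvRes g 0 r c = pvGet2 g r c := by
  by_cases h1 : ∃ f, pvFB g f c = true ∧ f + 0 = r
  · rw [pvRes_F g 0 r c h1]
    obtain ⟨f, hf, he⟩ := h1
    have : f = r := by omega
    subst this
    exact (((pvFB_iff g f c).1 hf).2.2).symm
  · rw [pvRes_keep g 0 r c h1]
    rintro ⟨f, -, h, h'⟩
    omega

theorem get2_writeAll (ps : List (Nat × Nat)) (v : String) (g : List (List String)) (r c : Nat) :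
    pvGet2 (ps.foldl (fun h q => pvSet2 h q.1 q.2 v) g) r c =
      if ∃ q ∈ ps, q.1 = r ∧ q.2 = c ∧ r < g.length ∧ c < pvRlen g r then v
      else pvGet2 g r c :=
  get2_foldl_pvSet2 ps (fun q => q) v g r c

theorem get2_writeShift (ps : List (Nat × Nat)) (d : Nat) (v : String) (g : List (List String))
    (r c : Nat) :
    pvGet2 (ps.foldl (fun h rc => pvSet2 h (rc.1 + d) rc.2 v) g) r c =
      if ∃ q ∈ ps, q.1 + d = r ∧ q.2 = c ∧ r < g.length ∧ c < pvRlen g r then v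
      else pvGet2 g r c :=
  get2_foldl_pvSet2 ps (fun rc => (rc.1 + d, rc.2)) v g r c

theorem length_writeAll (ps : List (Nat × Nat)) (v : String) (g : List (List String)) :
    (ps.foldl (fun h q => pvSet2 h q.1 q.2 v) g).length = g.length :=
  length_foldl_pvSet2 ps (fun q => q) v g

theorem rlen_writeAll (ps : List (Nat × Nat)) (v : String) (g : List (List String)) (i : Nat) :
    pvRlen (ps.foldl (fun h q => pvSet2 h q.1 q.2 v) g) i = pvRlen g i :=
  rlen_foldl_pvSet2 ps (fun q => q) v g i

theorem length_writeShift (ps : List (Nat × Nat)) (d : Nat) (v : String) (g : List (List String)) :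
    (ps.foldl (fun h rc => pvSet2 h (rc.1 + d) rc.2 v) g).length = g.length :=
  length_foldl_pvSet2 ps (fun rc => (rc.1 + d, rc.2)) v g

theorem rlen_writeShift (ps : List (Nat × Nat)) (d : Nat) (v : String) (g : List (List String))
    (i : Nat) :
    pvRlen (ps.foldl (fun h rc => pvSet2 h (rc.1 + d) rc.2 v) g) i = pvRlen g i :=
  rlen_foldl_pvSet2 ps (fun rc => (rc.1 + d, rc.2)) v g i

theorem dash_flatten (ps : List (Nat × Nat)) (d : Nat) (g : List (List String)) :
    ps.foldl (fun h rc =>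
        (List.range d).foldl (fun h2 k => pvSet2 h2 (rc.1 + k) rc.2 "-") h) g =
      (ps.flatMap (fun rc => (List.range d).map (fun k => (rc.1 + k, rc.2)))).foldl
        (fun h q => pvSet2 h q.1 q.2 "-") g := by
  rw [List.foldl_flatMap]
  simp only [List.foldl_map]

theorem alt_eq_branches (g : List (List String)) :
    simulate_fall2_alt g =
      if ((pvPass1 g.length (g.headD []).length g).1 ≠ [] ∧
          0 < (pvPass1 g.length (g.headD []).length g).2) then
        (pvPass1 g.length (g.headD []).length g).1.foldl
          (fun h rc => pvSet2 h (rc.1 + (pvPass1 g.length (g.headD []).length g).2) rc.2 "F")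
          ((pvPass1 g.length (g.headD []).length g).1.foldl
            (fun h rc => (List.range (pvPass1 g.length (g.headD []).length g).2).foldl
              (fun h2 k => pvSet2 h2 (rc.1 + k) rc.2 "-") h) g)
      else g := rfl

theorem alt_length (g : List (List String)) :
    (simulate_fall2_alt g).length = g.length := by
  rw [alt_eq_branches]
  split
  · rw [length_writeShift, dash_flatten, length_writeAll]
  · rfl

theorem alt_rlen (g : List (List String)) (i : Nat) :
    pvRlen (simulate_fall2_alt g) i = pvRlen g i := by
  rw [alt_eq_branches]
  split
  · rw [rlen_writeShift, dash_flatten, rlen_writeAll]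
  · rfl


theorem alt_point (g : List (List String)) (hg : pvDims g) (r c : Nat) :
    pvGet2 (simulate_fall2_alt g) r c = pvRes g (pvD g) r c := by
  obtain ⟨M, DLE, DALL, DATT⟩ := pvPass1_char g ((g.headD []).length)
  have hpd : pvD g = (pvPass1 g.length (g.headD []).length g).2 := rfl
  have hFb : ∀ f, pvFB g f c = true → pvD g ≤ pvGap g c f ∧ f + pvGap g c f + 1 ≤ g.length := by
    intro f hf
    obtain ⟨h1, h2, h3⟩ := (pvFB_iff g f c).1 hf
    exact ⟨hpd ▸ DALL f c h1 h2 h3, by have := pvGap_le g c f h1; omega⟩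
  rw [alt_eq_branches]
  split
  · rename_i hcond
    obtain ⟨hne, hpos⟩ := hcond
    rw [get2_writeShift, dash_flatten, length_writeAll, rlen_writeAll, get2_writeAll]
    have hCF : (∃ q ∈ (pvPass1 g.length (g.headD []).length g).1,
        q.1 + (pvPass1 g.length (g.headD []).length g).2 = r ∧ q.2 = c ∧
          r < g.length ∧ c < pvRlen g r) ↔
        (∃ f, pvFB g f c = true ∧ f + pvD g = r) := by
      constructor
      · rintro ⟨q, hq, h1, h2, -, -⟩
        obtain ⟨m1, m2, m3⟩ := (M q).1 hq
        exact ⟨q.1, (pvFB_iff g q.1 c).2 ⟨m1, h2 ▸ m2, h2 ▸ m3⟩, hpd ▸ h1⟩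
      · rintro ⟨f, hf, he⟩
        obtain ⟨h1, h2, h3⟩ := (pvFB_iff g f c).1 hf
        obtain ⟨hle, hlen⟩ := hFb f hf
        have hr : r < g.length := by omega
        exact ⟨(f, c), (M (f, c)).2 ⟨h1, h2, h3⟩, hpd ▸ he, rfl, hr,
          lt_of_lt_of_le h2 (hg.2 r hr)⟩
    have hCD : (∃ q ∈ (pvPass1 g.length (g.headD []).length g).1.flatMap
        (fun rc => (List.range (pvPass1 g.length (g.headD []).length g).2).map
          (fun k => (rc.1 + k, rc.2))),
        q.1 = r ∧ q.2 = c ∧ r < g.length ∧ c < pvRlen g r) ↔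
        (∃ f, pvFB g f c = true ∧ f ≤ r ∧ r < f + pvD g) := by
      constructor
      · rintro ⟨q, hq, h1, h2, -, -⟩
        rw [List.mem_flatMap] at hq
        obtain ⟨rc, hrc, hq2⟩ := hq
        rw [List.mem_map] at hq2
        obtain ⟨k, hk, he⟩ := hq2
        rw [List.mem_range] at hk
        obtain ⟨m1, m2, m3⟩ := (M rc).1 hrc
        subst he
        simp only at h1 h2
        refine ⟨rc.1, (pvFB_iff g rc.1 c).2 ⟨m1, h2 ▸ m2, h2 ▸ m3⟩, by omega, by omega⟩
      · rintro ⟨f, hf, hle, hlt⟩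
        obtain ⟨h1, h2, h3⟩ := (pvFB_iff g f c).1 hf
        obtain ⟨hdle, hlen⟩ := hFb f hf
        have hr : r < g.length := by omega
        refine ⟨(r, c), ?_, rfl, rfl, hr, lt_of_lt_of_le h2 (hg.2 r hr)⟩
        rw [List.mem_flatMap]
        refine ⟨(f, c), (M (f, c)).2 ⟨h1, h2, h3⟩, ?_⟩
        rw [List.mem_map]
        exact ⟨r - f, List.mem_range.2 (by omega), by simp; omega⟩
    by_cases h1 : ∃ f, pvFB g f c = true ∧ f + pvD g = r
    · rw [if_pos (hCF.2 h1), pvRes_F g (pvD g) r c h1]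
    · rw [if_neg (fun hx => h1 (hCF.1 hx))]
      by_cases h2 : ∃ f, pvFB g f c = true ∧ f ≤ r ∧ r < f + pvD g
      · rw [if_pos (hCD.2 h2), pvRes_dash g (pvD g) r c h1 h2]
      · rw [if_neg (fun hx => h2 (hCD.1 hx)), pvRes_keep g (pvD g) r c h1 h2]
  · rename_i hcond
    rcases not_and_or.1 hcond with hne | hpos
    · have hnil : (pvPass1 g.length (g.headD []).length g).1 = [] := by
        by_contra hx; exact hne hx
      have hnoF : ∀ f, ¬ pvFB g f c = true := by
        intro f hf
        obtain ⟨h1, h2, h3⟩ := (pvFB_iff g f c).1 hf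
        have := (M (f, c)).2 ⟨h1, h2, h3⟩
        rw [hnil] at this
        simp at this
      rw [pvRes_keep g (pvD g) r c]
      · rintro ⟨f, hf, -⟩; exact hnoF f hf
      · rintro ⟨f, hf, -⟩; exact hnoF f hf
    · have h0 : pvD g = 0 := by omega
      rw [h0, pvRes_zero]


-- one iteration of A's loop body (the two write passes), as pvLoopA performs it
def pvMove (g : List (List String)) : List (List String) :=
  (pvShape g.length (g.headD []).length g).foldl (fun h rc => pvSet2 h (rc.1 + 1) rc.2 "F")
    ((pvShape g.length (g.headD []).length g).foldl (fun h rc => pvSet2 h rc.1 rc.2 "-") g)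

theorem mem_pvShape_FB (g : List (List String)) (rc : Nat × Nat) :
    rc ∈ pvShape g.length (g.headD []).length g ↔ pvFB g rc.1 rc.2 = true := by
  rw [mem_pvShape, pvFB_iff]

theorem shape_nil_noFB (g : List (List String))
    (h : pvShape g.length (g.headD []).length g = []) :
    ∀ f c, ¬ pvFB g f c = true := by
  intro f c hf
  have := (mem_pvShape_FB g (f, c)).2 hf
  rw [h] at this
  simp at this

theorem canFall_D (g : List (List String))
    (hne : pvShape g.length (g.headD []).length g ≠ []) :
    pvCanFall g.length g (pvShape g.length (g.headD []).length g) = true ↔ 1 ≤ pvD g := by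
  obtain ⟨M, DLE, DALL, DATT⟩ := pvPass1_char g ((g.headD []).length)
  rw [pvCanFall_iff]
  constructor
  · intro h
    rcases DATT with hD | ⟨r, c, h1, h2, h3, h4⟩
    · have : 0 < g.length := by
        obtain ⟨rc, hrc⟩ := List.exists_mem_of_ne_nil _ hne
        exact lt_of_le_of_lt (Nat.zero_le _) ((mem_pvShape _ _ g rc).1 hrc).1
      show 1 ≤ (pvPass1 g.length (g.headD []).length g).2
      omega
    · have hmem : (r, c) ∈ pvShape g.length (g.headD []).length g :=
        (mem_pvShape _ _ g (r, c)).2 ⟨h1, h2, h3⟩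
      have := h (r, c) hmem
      have hpos : 0 < pvGap g c r := (pvGap_pos_iff g c r).2 ⟨this.1, this.2⟩
      show 1 ≤ (pvPass1 g.length (g.headD []).length g).2
      omega
  · intro hD rc hrc
    obtain ⟨h1, h2, h3⟩ := (mem_pvShape _ _ g rc).1 hrc
    have := DALL rc.1 rc.2 h1 h2 h3
    have hpos : 0 < pvGap g rc.2 rc.1 := by
      have : pvD g ≤ pvGap g rc.2 rc.1 := this
      omega
    exact (pvGap_pos_iff g rc.2 rc.1).1 hpos

theorem move_length (g : List (List String)) : (pvMove g).length = g.length := by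
  unfold pvMove
  rw [length_writeShift, length_writeAll]

theorem move_rlen (g : List (List String)) (i : Nat) : pvRlen (pvMove g) i = pvRlen g i := by
  unfold pvMove
  rw [rlen_writeShift, rlen_writeAll]

theorem move_C (g : List (List String)) :
    ((pvMove g).headD []).length = (g.headD []).length := by
  rw [pvC_eq, pvC_eq, move_rlen]

theorem move_get2 (g : List (List String)) (hg : pvDims g)
    (hcf : pvCanFall g.length g (pvShape g.length (g.headD []).length g) = true) (r c : Nat) :
    pvGet2 (pvMove g) r c = pvRes g 1 r c := by
  have hcf' := (pvCanFall_iff _ _ _).1 hcf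
  unfold pvMove
  rw [get2_writeShift, length_writeAll, rlen_writeAll, get2_writeAll]
  have hCF : (∃ q ∈ pvShape g.length (g.headD []).length g,
      q.1 + 1 = r ∧ q.2 = c ∧ r < g.length ∧ c < pvRlen g r) ↔
      (∃ f, pvFB g f c = true ∧ f + 1 = r) := by
    constructor
    · rintro ⟨q, hq, h1, h2, -, -⟩
      exact ⟨q.1, h2 ▸ (mem_pvShape_FB g q).1 hq, h1⟩
    · rintro ⟨f, hf, he⟩
      obtain ⟨h1, h2, h3⟩ := (pvFB_iff g f c).1 hf
      have hmem := (mem_pvShape_FB g (f, c)).2 hf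
      have hr : r < g.length := he ▸ (hcf' (f, c) hmem).1
      exact ⟨(f, c), hmem, he, rfl, hr, lt_of_lt_of_le h2 (hg.2 r hr)⟩
  have hCD : (∃ q ∈ pvShape g.length (g.headD []).length g,
      q.1 = r ∧ q.2 = c ∧ r < g.length ∧ c < pvRlen g r) ↔
      (∃ f, pvFB g f c = true ∧ f ≤ r ∧ r < f + 1) := by
    constructor
    · rintro ⟨q, hq, h1, h2, -, -⟩
      exact ⟨q.1, h2 ▸ (mem_pvShape_FB g q).1 hq, by omega, by omega⟩
    · rintro ⟨f, hf, hle, hlt⟩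
      have hfr : f = r := by omega
      subst hfr
      obtain ⟨h1, h2, h3⟩ := (pvFB_iff g f c).1 hf
      exact ⟨(f, c), (mem_pvShape_FB g (f, c)).2 hf, rfl, rfl, h1,
        lt_of_lt_of_le h2 (hg.2 f h1)⟩
  by_cases h1 : ∃ f, pvFB g f c = true ∧ f + 1 = r
  · rw [if_pos (hCF.2 h1), pvRes_F g 1 r c h1]
  · rw [if_neg (fun hx => h1 (hCF.1 hx))]
    by_cases h2 : ∃ f, pvFB g f c = true ∧ f ≤ r ∧ r < f + 1
    · rw [if_pos (hCD.2 h2), pvRes_dash g 1 r c h1 h2]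
    · rw [if_neg (fun hx => h2 (hCD.1 hx)), pvRes_keep g 1 r c h1 h2]


theorem move_F (g : List (List String)) (hg : pvDims g)
    (hcf : pvCanFall g.length g (pvShape g.length (g.headD []).length g) = true) (r c : Nat) :
    pvFB (pvMove g) r c = true ↔ ∃ f, pvFB g f c = true ∧ f + 1 = r := by
  have hcf' := (pvCanFall_iff _ _ _).1 hcf
  rw [pvFB_iff, move_length, move_C, move_get2 g hg hcf]
  constructor
  · rintro ⟨hr, hc, hv⟩
    by_cases h1 : ∃ f, pvFB g f c = true ∧ f + 1 = r
    · exact h1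
    · exfalso
      by_cases h2 : ∃ f, pvFB g f c = true ∧ f ≤ r ∧ r < f + 1
      · rw [pvRes_dash g 1 r c h1 h2] at hv
        exact absurd hv (by decide)
      · rw [pvRes_keep g 1 r c h1 h2] at hv
        exact h2 ⟨r, (pvFB_iff g r c).2 ⟨hr, hc, hv⟩, le_rfl, by omega⟩
  · rintro ⟨f, hf, he⟩
    obtain ⟨h1, h2, h3⟩ := (pvFB_iff g f c).1 hf
    have hmem := (mem_pvShape_FB g (f, c)).2 hf
    refine ⟨he ▸ (hcf' (f, c) hmem).1, h2, ?_⟩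
    exact pvRes_F g 1 r c ⟨f, hf, he⟩

theorem move_H (g : List (List String)) (hg : pvDims g)
    (hcf : pvCanFall g.length g (pvShape g.length (g.headD []).length g) = true) (r c : Nat) :
    pvGet2 (pvMove g) r c = "#" ↔ pvGet2 g r c = "#" := by
  have hcf' := (pvCanFall_iff _ _ _).1 hcf
  rw [move_get2 g hg hcf]
  by_cases h1 : ∃ f, pvFB g f c = true ∧ f + 1 = r
  · rw [pvRes_F g 1 r c h1]
    obtain ⟨f, hf, he⟩ := h1
    have hmem := (mem_pvShape_FB g (f, c)).2 hf
    have := (hcf' (f, c) hmem).2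
    constructor
    · intro hx; exact absurd hx (by decide)
    · intro hx; exact absurd (he ▸ hx) this
  · by_cases h2 : ∃ f, pvFB g f c = true ∧ f ≤ r ∧ r < f + 1
    · rw [pvRes_dash g 1 r c h1 h2]
      obtain ⟨f, hf, hle, hlt⟩ := h2
      have hfr : f = r := by omega
      subst hfr
      have h3 := ((pvFB_iff g f c).1 hf).2.2
      constructor
      · intro hx; exact absurd hx (by decide)
      · intro hx; rw [h3] at hx; exact absurd hx (by decide)
    · rw [pvRes_keep g 1 r c h1 h2]

theorem move_gap (g : List (List String)) (hg : pvDims g)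
    (hcf : pvCanFall g.length g (pvShape g.length (g.headD []).length g) = true) (c r : Nat) :
    pvGap (pvMove g) c r = pvGap g c r :=
  pvGap_congr (pvMove g) g (move_length g) (fun r c => move_H g hg hcf r c) c r

theorem move_dims (g : List (List String)) (hg : pvDims g) : pvDims (pvMove g) := by
  constructor
  · intro hx
    have h := move_length g
    rw [hx] at h
    simp at h
    exact hg.1 (List.eq_nil_of_length_eq_zero h.symm)
  · intro r hr
    rw [move_C, move_rlen]
    rw [move_length g] at hr
    exact hg.2 r hr


theorem D_attained (g : List (List String))
    (hne : pvShape g.length (g.headD []).length g ≠ []) :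
    pvD g < g.length ∧ ∃ r c, pvFB g r c = true ∧ pvGap g c r = pvD g := by
  obtain ⟨M, DLE, DALL, DATT⟩ := pvPass1_char g ((g.headD []).length)
  obtain ⟨rc, hrc⟩ := List.exists_mem_of_ne_nil _ hne
  obtain ⟨h1, h2, h3⟩ := (mem_pvShape _ _ g rc).1 hrc
  have hgap := pvGap_le g rc.2 rc.1 h1
  have hD : pvD g ≤ pvGap g rc.2 rc.1 := DALL rc.1 rc.2 h1 h2 h3
  have hlt : pvD g < g.length := by omega
  refine ⟨hlt, ?_⟩
  rcases DATT with h | ⟨r, c, k1, k2, k3, k4⟩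
  · have : pvD g = g.length := h
    omega
  · exact ⟨r, c, (pvFB_iff g r c).2 ⟨k1, k2, k3⟩, k4⟩

theorem move_D (g : List (List String)) (hg : pvDims g)
    (hcf : pvCanFall g.length g (pvShape g.length (g.headD []).length g) = true)
    (hne : pvShape g.length (g.headD []).length g ≠ []) :
    pvD (pvMove g) = pvD g - 1 := by
  have hD1 : 1 ≤ pvD g := (canFall_D g hne).1 hcf
  obtain ⟨hDlt, r0, c0, hf0, hgap0⟩ := D_attained g hne
  obtain ⟨Mm, DLEm, DALLm, DATTm⟩ := pvPass1_char (pvMove g) (((pvMove g).headD []).length)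
  have hF0m : pvFB (pvMove g) (r0 + 1) c0 = true :=
    (move_F g hg hcf (r0 + 1) c0).2 ⟨r0, hf0, rfl⟩
  obtain ⟨m1, m2, m3⟩ := (pvFB_iff _ _ _).1 hF0m
  have hgapsucc : pvGap g c0 r0 = pvGap g c0 (r0 + 1) + 1 :=
    pvGap_succ g c0 r0 (by omega)
  have hup : pvD (pvMove g) ≤ pvD g - 1 := by
    have h := DALLm (r0 + 1) c0 m1 m2 m3
    rw [move_gap g hg hcf] at h
    have h2 : pvD (pvMove g) ≤ pvGap g c0 (r0 + 1) := h
    omega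
  have hlow : pvD g - 1 ≤ pvD (pvMove g) := by
    rcases DATTm with h | ⟨r, c, k1, k2, k3, k4⟩
    · have h2 : pvD (pvMove g) = (pvMove g).length := h
      rw [move_length] at h2
      omega
    · have hFm : pvFB (pvMove g) r c = true := (pvFB_iff _ _ _).2 ⟨k1, k2, k3⟩
      obtain ⟨f, hf, he⟩ := (move_F g hg hcf r c).1 hFm
      obtain ⟨M, DLE, DALL, DATT⟩ := pvPass1_char g ((g.headD []).length)
      obtain ⟨q1, q2, q3⟩ := (pvFB_iff g f c).1 hf
      have hDle : pvD g ≤ pvGap g c f := DALL f c q1 q2 q3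
      have hsucc : pvGap g c f = pvGap g c (f + 1) + 1 := pvGap_succ g c f (by omega)
      have hk4 : pvGap g c r = pvD (pvMove g) := by
        rw [← move_gap g hg hcf]; exact k4
      rw [← he] at hk4
      omega
  omega

theorem move_res (g : List (List String)) (hg : pvDims g)
    (hcf : pvCanFall g.length g (pvShape g.length (g.headD []).length g) = true)
    (hne : pvShape g.length (g.headD []).length g ≠ []) (r c : Nat) :
    pvRes (pvMove g) (pvD g - 1) r c = pvRes g (pvD g) r c := by
  have hD1 : 1 ≤ pvD g := (canFall_D g hne).1 hcf
  set D' := pvD g - 1 with hD'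
  have hD : pvD g = D' + 1 := by omega
  have hc1 : (∃ f2, pvFB (pvMove g) f2 c = true ∧ f2 + D' = r) ↔
      (∃ f, pvFB g f c = true ∧ f + pvD g = r) := by
    constructor
    · rintro ⟨f2, hf2, he⟩
      obtain ⟨f, hf, he1⟩ := (move_F g hg hcf f2 c).1 hf2
      exact ⟨f, hf, by omega⟩
    · rintro ⟨f, hf, he⟩
      exact ⟨f + 1, (move_F g hg hcf (f + 1) c).2 ⟨f, hf, rfl⟩, by omega⟩
  by_cases h1 : ∃ f, pvFB g f c = true ∧ f + pvD g = r
  · rw [pvRes_F _ _ _ _ (hc1.2 h1), pvRes_F _ _ _ _ h1]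
  · have h1m : ¬ ∃ f2, pvFB (pvMove g) f2 c = true ∧ f2 + D' = r := fun hx => h1 (hc1.1 hx)
    rcases Nat.eq_zero_or_pos D' with hz | hpos
    · rw [hz, pvRes_zero, move_get2 g hg hcf, hD, hz]
    · by_cases h2 : ∃ f, pvFB g f c = true ∧ f ≤ r ∧ r < f + pvD g
      · rw [pvRes_dash g _ r c h1 h2]
        by_cases h2m : ∃ f2, pvFB (pvMove g) f2 c = true ∧ f2 ≤ r ∧ r < f2 + D'
        · rw [pvRes_dash _ _ _ _ h1m h2m]
        · rw [pvRes_keep _ _ _ _ h1m h2m, move_get2 g hg hcf]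
          apply pvRes_dash g 1 r c
          · rintro ⟨f', hf', he'⟩
            exact h2m ⟨f' + 1, (move_F g hg hcf (f' + 1) c).2 ⟨f', hf', rfl⟩, by omega, by omega⟩
          · obtain ⟨f, hf, hle, hlt⟩ := h2
            rcases Nat.lt_or_ge f r with hfr | hfr
            · exact absurd ⟨f + 1, (move_F g hg hcf (f + 1) c).2 ⟨f, hf, rfl⟩,
                by omega, by omega⟩ h2m
            · exact ⟨f, hf, by omega, by omega⟩
      · have h2m : ¬ ∃ f2, pvFB (pvMove g) f2 c = true ∧ f2 ≤ r ∧ r < f2 + D' := by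
          rintro ⟨f2, hf2, hle, hlt⟩
          obtain ⟨f, hf, he⟩ := (move_F g hg hcf f2 c).1 hf2
          exact h2 ⟨f, hf, by omega, by omega⟩
        rw [pvRes_keep _ _ _ _ h1m h2m, pvRes_keep g _ r c h1 h2, move_get2 g hg hcf]
        apply pvRes_keep g 1 r c
        · rintro ⟨f, hf, he⟩
          exact h2 ⟨f, hf, by omega, by omega⟩
        · rintro ⟨f, hf, hle, hlt⟩
          exact h2 ⟨f, hf, by omega, by omega⟩


theorem pvLoopA_succ (g : List (List String)) (n : Nat) :
    pvLoopA g.length (g.headD []).length (n + 1) g =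
      if (pvShape g.length (g.headD []).length g).isEmpty then g
      else if pvCanFall g.length g (pvShape g.length (g.headD []).length g) then
        pvLoopA g.length (g.headD []).length n (pvMove g)
      else g := rfl

theorem loopA_char : ∀ (fuel : Nat) (g : List (List String)), pvDims g → pvD g < fuel →
    (pvLoopA g.length (g.headD []).length fuel g).length = g.length ∧
    (∀ i, pvRlen (pvLoopA g.length (g.headD []).length fuel g) i = pvRlen g i) ∧
    (∀ r c, pvGet2 (pvLoopA g.length (g.headD []).length fuel g) r c =
      pvRes g (pvD g) r c) := by
  intro fuel
  induction fuel with
  | zero =>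
    intro g hg hlt
    omega
  | succ n ih =>
    intro g hg hlt
    rw [pvLoopA_succ]
    by_cases hemp : pvShape g.length (g.headD []).length g = []
    · rw [if_pos (by rw [hemp]; rfl)]
      refine ⟨rfl, fun i => rfl, fun r c => ?_⟩
      rw [pvRes_keep g (pvD g) r c]
      · rintro ⟨f, hf, -⟩
        exact shape_nil_noFB g hemp f c hf
      · rintro ⟨f, hf, -⟩
        exact shape_nil_noFB g hemp f c hf
    · rw [if_neg (by rw [List.isEmpty_iff]; exact hemp)]
      by_cases hcf : pvCanFall g.length g (pvShape g.length (g.headD []).length g) = true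
      · rw [if_pos hcf]
        have hD1 : 1 ≤ pvD g := (canFall_D g hemp).1 hcf
        have hdm := move_dims g hg
        have hDm : pvD (pvMove g) = pvD g - 1 := move_D g hg hcf hemp
        obtain ⟨L1, L2, L3⟩ := ih (pvMove g) hdm (by omega)
        rw [move_length g, move_C g] at L1 L2 L3
        refine ⟨L1, fun i => (L2 i).trans (move_rlen g i),
          fun r c => ?_⟩
        rw [L3 r c, hDm, move_res g hg hcf hemp r c]
      · rw [if_neg hcf]
        have hD0 : pvD g = 0 := by
          rcases Nat.eq_zero_or_pos (pvD g) with h | h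
          · exact h
          · exact absurd ((canFall_D g hemp).2 h) hcf
        refine ⟨rfl, fun i => rfl, fun r c => ?_⟩
        rw [hD0, pvRes_zero]

theorem grid_ext (g h : List (List String)) (hl : g.length = h.length)
    (hr : ∀ i, pvRlen g i = pvRlen h i) (hp : ∀ r c, pvGet2 g r c = pvGet2 h r c) :
    g = h := by
  apply List.ext_getElem hl
  intro i h1 h2
  apply List.ext_getElem
  · have hri := hr i
    simp only [pvRlen, List.getD_eq_getElem?_getD, List.getElem?_eq_getElem h1,
      List.getElem?_eq_getElem h2, Option.getD_some] at hri
    exact hri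
  · intro j j1 j2
    have hij := hp i j
    simp only [pvGet2, List.getD_eq_getElem?_getD, List.getElem?_eq_getElem h1,
      List.getElem?_eq_getElem h2, Option.getD_some, List.getElem?_eq_getElem j1,
      List.getElem?_eq_getElem j2] at hij
    exact hij

theorem pre_dims (matrix : List (List String)) (h : Pre_simulate_fall2 matrix) :
    pvDims matrix := by
  obtain ⟨h1, h2⟩ := h
  refine ⟨h1, fun r hr => ?_⟩
  have hm : matrix.getD r [] ∈ matrix := by
    rw [List.getD_eq_getElem?_getD, List.getElem?_eq_getElem hr]
    exact List.getElem_mem hr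
  exact h2 _ hm

theorem simulate_fall2_spec : Claim_equal_simulate_fall2 := by
  intro matrix hdom hpre
  unfold Spec_simulate_fall2
  have hg := pre_dims matrix hpre
  obtain ⟨M, DLE, -, -⟩ := pvPass1_char matrix ((matrix.headD []).length)
  have hfuel : pvD matrix < matrix.length + 1 := by
    have hle : pvD matrix ≤ matrix.length := DLE
    omega
  obtain ⟨L1, L2, L3⟩ := loopA_char (matrix.length + 1) matrix hg hfuel
  have hA : simulate_fall2 matrix =
      pvLoopA matrix.length ((matrix.headD []).length) (matrix.length + 1) matrix := rfl
  rw [hA]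
  apply grid_ext
  · rw [L1, alt_length]
  · intro i
    rw [L2 i, alt_rlen]
  · intro r c
    rw [L3 r c, alt_point matrix hg r c]
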